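-- pv_equiv track=rewrite | github.com/mikegomezg/agent_westworld | scripts/generate/timeline_visualization.py | generate_period_breakdown
-- ===== SOURCE A (Python) =====
-- from typing import Dict, List
--
-- def parse_date(date_str: str) -> int:
--     """Parse date string to year for sorting"""
--     try:
--         if isinstance(date_str, int):
--             return date_str
--         if isinstance(date_str, str):
--             # Handle various date formats
--             if date_str.isdigit():
--                 return int(date_str)
--             # Add more date parsing logic as needed
--         return 0
--     except:
--         return 0
--
-- def generate_period_breakdown(events: List[Dict]) -> str:
--     """Generate breakdown by narrative periods"""
--     periods = {}
--
--     for event in events: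
--         if not event:
--             continue
--
--         period = event.get('period', 'Unknown Period')
--         if period not in periods:
--             periods[period] = []
--         periods[period].append(event)
--
--     breakdown = "## Narrative Periods\n\n"
--
--     for period, period_events in periods.items():
--         breakdown += f"### {period}\n\n"
--
--         # Sort events in this period by date
--         sorted_events = sorted(period_events, key=lambda x: parse_date(x.get('date', 0)))
--
--         for event in sorted_events:
--             date = event.get('date', 'Unknown Date')
--             title = event.get('title', 'Untitled Event')
--             breakdown += f"- **{date}**: {title}\n"
--
--         breakdown += "\n"
--
--     return breakdown
-- ===== SOURCE B (Python) =====
-- def parse_date(date_str) -> int: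
--     """Parse date string to year for sorting"""
--     try:
--         if isinstance(date_str, int):
--             return date_str
--         if isinstance(date_str, str):
--             if date_str.isdigit():
--                 return int(date_str)
--         return 0
--     except:
--         return 0
--
-- def generate_period_breakdown(events):
--     """Generate breakdown by narrative periods (dedup keys + per-period filter, join of parts)"""
--     kept = [e for e in events if e]
--     order = list(dict.fromkeys(e.get('period', 'Unknown Period') for e in kept))
--     parts = ["## Narrative Periods\n\n"]
--     for p in order:
--         group = sorted([e for e in kept if e.get('period', 'Unknown Period') == p],
--                        key=lambda x: parse_date(x.get('date', 0)))
--         body = "".join(f"- **{e.get('date', 'Unknown Date')}**: {e.get('title', 'Untitled Event')}\n"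
--                        for e in group)
--         parts.append(f"### {p}\n\n" + body + "\n")
--     return "".join(parts)
-- ===== Notes on version B (the rewrite author's own statement) =====
-- stated objective: alternative
-- what changed: Replaces the mutable dict-of-lists grouping and string += accumulation with a first-seen dedup of period keys, a per-period filter over the kept events, and a join of rendered parts.
import Mathlib
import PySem

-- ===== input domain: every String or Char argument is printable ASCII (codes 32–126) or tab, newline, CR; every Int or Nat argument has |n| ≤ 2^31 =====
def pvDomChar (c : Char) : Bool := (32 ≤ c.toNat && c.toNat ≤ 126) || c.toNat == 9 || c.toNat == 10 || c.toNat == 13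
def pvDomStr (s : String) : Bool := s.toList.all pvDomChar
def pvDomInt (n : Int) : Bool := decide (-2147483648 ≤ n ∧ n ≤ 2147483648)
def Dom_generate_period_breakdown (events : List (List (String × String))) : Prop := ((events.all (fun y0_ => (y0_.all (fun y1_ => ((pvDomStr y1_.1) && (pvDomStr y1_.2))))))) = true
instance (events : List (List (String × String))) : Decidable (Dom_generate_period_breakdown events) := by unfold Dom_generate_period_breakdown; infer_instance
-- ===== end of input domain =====

-- B replaces the dict-of-lists grouping and += accumulation by dedup of period keys, per-period filters and a join of parts (alternative decomposition, not faster).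

-- shared module helper: event.get(k, dflt) / event.get(k) on an event dict
def pvEvGetD (e : List (String × String)) (k d : String) : String := (PySem.Dict.ofList e).getD k d
def pvEvGet (e : List (String × String)) (k : String) : Option String := (PySem.Dict.ofList e).get? k

-- shared module helper parse_date: argument is x.get('date', 0) — none stands for the int default 0
def parse_date (d : Option String) : Int :=
  match d with
  | none => 0                    -- isinstance(date_str, int): the default 0
  | some s => if PySem.Str.strIsdigit s then (PySem.Int.ofStr? s).getD 0 else 0

-- ===== PORT A =====
def generate_period_breakdown (events : List (List (String × String))) : String :=
  -- periods = {}; for event in events: skip falsy, group by period (append to list, creating [] first)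
  let periods : PySem.Dict String (List (List (String × String))) :=
    events.foldl (fun d event =>
      if event = [] then d
      else d.modify (pvEvGetD event "period" "Unknown Period") [] (fun l => l ++ [event]))
      PySem.Dict.empty
  periods.items.foldl (fun acc pe =>
    let acc := acc ++ "### " ++ pe.1 ++ "\n\n"
    let sorted_events := PySem.List.sorted pe.2 (fun x => parse_date (pvEvGet x "date")) false
    let acc := sorted_events.foldl (fun acc event =>
      acc ++ "- **" ++ pvEvGetD event "date" "Unknown Date" ++ "**: " ++
        pvEvGetD event "title" "Untitled Event" ++ "\n") acc
    acc ++ "\n") "## Narrative Periods\n\n"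

-- ===== PORT B =====
def generate_period_breakdown_alt (events : List (List (String × String))) : String :=
  let kept := events.filter (fun e => !(e == []))
  let order := PySem.List.dedup (kept.map (fun e => pvEvGetD e "period" "Unknown Period"))
  let parts := ["## Narrative Periods\n\n"] ++ order.map (fun p =>
    let group := PySem.List.sorted (kept.filter (fun e => pvEvGetD e "period" "Unknown Period" == p))
      (fun x => parse_date (pvEvGet x "date")) false
    let body := String.join (group.map (fun e =>
      "- **" ++ pvEvGetD e "date" "Unknown Date" ++ "**: " ++ pvEvGetD e "title" "Untitled Event" ++ "\n"))
    "### " ++ p ++ "\n\n" ++ body ++ "\n")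
  String.join parts

-- ===== PRECONDITION & SPEC =====
def Spec_generate_period_breakdown (events : List (List (String × String))) (out : String) : Prop := out = generate_period_breakdown_alt events
instance (events : List (List (String × String))) (out : String) : Decidable (Spec_generate_period_breakdown events out) := by unfold Spec_generate_period_breakdown; infer_instance

-- ===== CLAIM (what is proved, stated in full; the proofs are below) =====
def Claim_equal_generate_period_breakdown : Prop := ∀ (events : List (List (String × String))), Dom_generate_period_breakdown events → Spec_generate_period_breakdown events (generate_period_breakdown events)

-- ===== LEMMAS AND PROOFS =====

theorem str_foldl_shift (l : List String) (a : String) :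
    l.foldl (fun r s => r ++ s) a = a ++ l.foldl (fun r s => r ++ s) "" := by
  induction l generalizing a with
  | nil => simp
  | cons x xs ih => rw [List.foldl_cons, List.foldl_cons, ih (a ++ x), ih ("" ++ x)]; simp [String.append_assoc]

theorem str_join_cons (s : String) (l : List String) :
    String.join (s :: l) = s ++ String.join l := by
  simp only [String.join, List.foldl_cons]
  rw [str_foldl_shift l ("" ++ s), str_foldl_shift l ""]
  simp

-- a foldl that appends f x to a string accumulator is the accumulator followed by the join of the pieces
theorem str_foldl_append {α : Type} (l : List α) (f : α → String) (a : String) :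
    l.foldl (fun acc x => acc ++ f x) a = a ++ String.join (l.map f) := by
  induction l generalizing a with
  | nil => simp [String.join]
  | cons x xs ih => rw [List.foldl_cons, ih, List.map_cons, str_join_cons]; simp [String.append_assoc]

def pvLine (e : List (String × String)) : String :=
  "- **" ++ pvEvGetD e "date" "Unknown Date" ++ "**: " ++ pvEvGetD e "title" "Untitled Event" ++ "\n"

def pvSeg (pe : String × List (List (String × String))) : String :=
  "### " ++ pe.1 ++ "\n\n" ++
    String.join ((PySem.List.sorted pe.2 (fun x => parse_date (pvEvGet x "date")) false).map pvLine) ++ "\n"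

-- the grouping loop of A, rewritten as a fold over (period, event) pairs of the kept events
theorem pairfold_eq (events : List (List (String × String))) :
    events.foldl (fun d event =>
        if event = [] then d
        else d.modify (pvEvGetD event "period" "Unknown Period") [] (fun l => l ++ [event]))
      (PySem.Dict.empty : PySem.Dict String (List (List (String × String))))
      =
    (((events.filter (fun e => !(e == []))).map
        (fun e => (pvEvGetD e "period" "Unknown Period", e))).foldl
      (fun d p => d.modify p.1 [] (fun l => l ++ [p.2])) PySem.Dict.empty) := by
  rw [List.foldl_map, List.foldl_filter]
  congr 1
  funext d e
  by_cases h : e = [] <;> simp [h]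

theorem grouping_items (events : List (List (String × String))) :
    (events.foldl (fun d event =>
        if event = [] then d
        else d.modify (pvEvGetD event "period" "Unknown Period") [] (fun l => l ++ [event]))
        (PySem.Dict.empty : PySem.Dict String (List (List (String × String))))).items
      =
    (PySem.List.dedup ((events.filter (fun e => !(e == []))).map
        (fun e => pvEvGetD e "period" "Unknown Period"))).map
      (fun p => (p, (events.filter (fun e => !(e == []))).filter
        (fun e => pvEvGetD e "period" "Unknown Period" == p))) := by
  rw [pairfold_eq]
  set kept := events.filter (fun e => !(e == [])) with hk
  set pairs := kept.map (fun e => (pvEvGetD e "period" "Unknown Period", e)) with hp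
  have hnd : (pairs.foldl (fun d p => d.modify p.1 [] (fun l => l ++ [p.2]))
      (PySem.Dict.empty : PySem.Dict String (List (List (String × String))))).keys.Nodup :=
    PySem.Dict.nodup_keys_foldl_modify_key pairs Prod.fst [] (fun _ p => fun l => l ++ [p.2])
      PySem.Dict.empty (by simp)
  have hkeys : (pairs.foldl (fun d p => d.modify p.1 [] (fun l => l ++ [p.2]))
      (PySem.Dict.empty : PySem.Dict String (List (List (String × String))))).keys
      = PySem.List.dedup (kept.map (fun e => pvEvGetD e "period" "Unknown Period")) := by
    rw [PySem.Dict.keys_foldl_modify_key]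
    simp [hp, Function.comp_def, PySem.Set.update_nil_left]
  have hget : ∀ c, (pairs.foldl (fun d p => d.modify p.1 [] (fun l => l ++ [p.2]))
      (PySem.Dict.empty : PySem.Dict String (List (List (String × String))))).getD c []
      = kept.filter (fun e => pvEvGetD e "period" "Unknown Period" == c) := by
    intro c
    rw [PySem.Dict.getD_foldl_modify_append]
    simp [hp, List.filter_map, Function.comp_def]
  rw [PySem.Dict.items_eq_map_keys _ hnd [], hkeys]
  exact List.map_congr_left (fun p _ => by rw [hget p])

-- ===== VERDICT (by name: the statement is the Claim_ definition above) =====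
theorem inner_line_eq : (fun (acc : String) (event : List (String × String)) =>
      acc ++ "- **" ++ pvEvGetD event "date" "Unknown Date" ++ "**: " ++
        pvEvGetD event "title" "Untitled Event" ++ "\n")
    = fun (acc : String) (e : List (String × String)) => acc ++ pvLine e := by
  funext acc e
  simp [pvLine, String.append_assoc]

theorem big_eq : (fun (acc : String) (pe : String × List (List (String × String))) =>
      (PySem.List.sorted pe.2 (fun x => parse_date (pvEvGet x "date")) false).foldl
        (fun acc event => acc ++ "- **" ++ pvEvGetD event "date" "Unknown Date" ++ "**: " ++
          pvEvGetD event "title" "Untitled Event" ++ "\n")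
        (acc ++ "### " ++ pe.1 ++ "\n\n") ++ "\n")
    = fun (acc : String) pe => acc ++ pvSeg pe := by
  funext acc pe
  rw [inner_line_eq, str_foldl_append]
  simp [pvSeg, String.append_assoc]

theorem generate_period_breakdown_spec : Claim_equal_generate_period_breakdown := by
  intro events _
  unfold Spec_generate_period_breakdown generate_period_breakdown generate_period_breakdown_alt
  dsimp only
  rw [grouping_items, big_eq, str_foldl_append, List.map_map, List.singleton_append,
    str_join_cons]
  congr 1
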